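-- pv_equiv track=rewrite | github.com/AmyLin2013/docx2md | converter/numbering.py | _build_pstyle_map
-- ===== SOURCE A (Python) =====
-- def _build_pstyle_map(
--     abstract_nums: dict[str, dict[int, dict]],
--     num_to_abstract: dict[str, str],
--     num_overrides: dict[str, dict[int, dict]],
-- ) -> dict[str, tuple[str, int]]:
--     """Build {pStyle: (numId, ilvl)} mapping from numbering definitions.
--
--     When a <w:lvl> within a numbering definition contains <w:pStyle>,
--     it establishes a direct link between that paragraph style and the
--     numbering level. This allows heading styles to be correctly mapped
--     to their intended numId + ilvl, even when the style's own numPr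
--     references a different numId.
--
--     Override-level pStyle definitions take priority over abstract-level ones.
--     """
--     pstyle_map: dict[str, tuple[str, int]] = {}
--
--     # First pass: abstract num pStyle entries
--     for abstract_id, levels in abstract_nums.items():
--         # Find numIds that reference this abstractNum
--         for num_id, ref_abstract in num_to_abstract.items():
--             if ref_abstract != abstract_id:
--                 continue
--             for ilvl, level_def in levels.items():
--                 if "pStyle" in level_def:
--                     pstyle_map[level_def["pStyle"]] = (num_id, ilvl)
--
--     # Second pass: override pStyle entries (take priority)
--     for num_id, lvl_overrides in num_overrides.items():
--         for ilvl, override_def in lvl_overrides.items():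
--             if "pStyle" in override_def:
--                 pstyle_map[override_def["pStyle"]] = (num_id, ilvl)
--
--     return pstyle_map
-- ===== SOURCE B (Python) =====
-- def _build_pstyle_map(
--     abstract_nums: dict[str, dict[int, dict]],
--     num_to_abstract: dict[str, str],
--     num_overrides: dict[str, dict[int, dict]],
-- ) -> dict[str, tuple[str, int]]:
--     """Same mapping, but num_to_abstract is inverted once into an
--     abstract_id -> [num_ids] index, removing A's inner scan."""
--     idx: dict[str, list[str]] = {}
--     for num_id, abstract_id in num_to_abstract.items():
--         idx.setdefault(abstract_id, []).append(num_id)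
--
--     def _apply(pstyle_map, num_id, levels):
--         for ilvl, level_def in levels.items():
--             if "pStyle" in level_def:
--                 pstyle_map[level_def["pStyle"]] = (num_id, ilvl)
--
--     pstyle_map: dict[str, tuple[str, int]] = {}
--     for abstract_id, levels in abstract_nums.items():
--         for num_id in idx.get(abstract_id, []):
--             _apply(pstyle_map, num_id, levels)
--     for num_id, lvl_overrides in num_overrides.items():
--         _apply(pstyle_map, num_id, lvl_overrides)
--     return pstyle_map
-- ===== Notes on version B (the rewrite author's own statement) =====
-- stated objective: faster
-- what changed: Instead of rescanning num_to_abstract for every abstractNum, B inverts num_to_abstract once into an abstract_id -> [num_ids] index and does a single grouped pass in the same order.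
import Mathlib
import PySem

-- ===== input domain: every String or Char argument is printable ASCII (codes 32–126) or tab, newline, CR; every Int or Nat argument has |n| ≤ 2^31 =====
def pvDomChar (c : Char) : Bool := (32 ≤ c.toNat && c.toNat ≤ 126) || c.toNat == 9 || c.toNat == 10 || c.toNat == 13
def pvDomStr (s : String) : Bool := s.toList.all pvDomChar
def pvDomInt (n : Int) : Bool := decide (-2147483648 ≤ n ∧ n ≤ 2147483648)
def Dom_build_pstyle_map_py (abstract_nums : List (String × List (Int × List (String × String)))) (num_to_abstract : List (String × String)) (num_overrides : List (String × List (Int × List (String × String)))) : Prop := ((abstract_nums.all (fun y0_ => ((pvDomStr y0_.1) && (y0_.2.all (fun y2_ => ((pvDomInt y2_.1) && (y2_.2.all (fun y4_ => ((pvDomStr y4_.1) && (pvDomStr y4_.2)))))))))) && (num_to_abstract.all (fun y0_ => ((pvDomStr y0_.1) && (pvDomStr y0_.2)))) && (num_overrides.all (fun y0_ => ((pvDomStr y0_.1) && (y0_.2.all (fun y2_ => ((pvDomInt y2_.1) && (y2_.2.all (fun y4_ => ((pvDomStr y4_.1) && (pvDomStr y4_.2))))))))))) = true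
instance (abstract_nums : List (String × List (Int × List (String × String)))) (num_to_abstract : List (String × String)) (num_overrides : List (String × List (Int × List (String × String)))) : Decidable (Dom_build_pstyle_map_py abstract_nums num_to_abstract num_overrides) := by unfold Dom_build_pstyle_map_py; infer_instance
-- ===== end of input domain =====

-- B inverts num_to_abstract once into an abstract_id -> [num_ids] index, replacing A's inner rescan; return value only (no argument is mutated).
-- ===== PORT A =====
def build_pstyle_map_py (abstract_nums : List (String × List (Int × List (String × String)))) (num_to_abstract : List (String × String)) (num_overrides : List (String × List (Int × List (String × String)))) : List (String × String × Int) :=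
  let m1 := abstract_nums.foldl (fun m p =>
      num_to_abstract.foldl (fun m q =>
        if q.2 ≠ p.1 then m
        else p.2.foldl (fun m lv =>
            match (PySem.Dict.mk lv.2).get? "pStyle" with
            | some s => m.insert s (q.1, lv.1)
            | none => m) m) m) (PySem.Dict.empty : PySem.Dict String (String × Int))
  let m2 := num_overrides.foldl (fun m p =>
      p.2.foldl (fun m lv =>
        match (PySem.Dict.mk lv.2).get? "pStyle" with
        | some s => m.insert s (p.1, lv.1)
        | none => m) m) m1
  m2.items

-- ===== PORT B =====
-- helper `_apply` of Source B
def pvApplyLevels (m : PySem.Dict String (String × Int)) (num_id : String) (levels : List (Int × List (String × String))) : PySem.Dict String (String × Int) :=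
  levels.foldl (fun m lv =>
    match (PySem.Dict.mk lv.2).get? "pStyle" with
    | some s => m.insert s (num_id, lv.1)
    | none => m) m

def build_pstyle_map_py_alt (abstract_nums : List (String × List (Int × List (String × String)))) (num_to_abstract : List (String × String)) (num_overrides : List (String × List (Int × List (String × String)))) : List (String × String × Int) :=
  let idx := (num_to_abstract.map (fun q => (q.2, q.1))).foldl
      (fun d p => d.modify p.1 [] (· ++ [p.2])) (PySem.Dict.empty : PySem.Dict String (List String))
  let m1 := abstract_nums.foldl (fun m p =>
      (idx.getD p.1 []).foldl (fun m num_id => pvApplyLevels m num_id p.2) m)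
      (PySem.Dict.empty : PySem.Dict String (String × Int))
  let m2 := num_overrides.foldl (fun m p => pvApplyLevels m p.1 p.2) m1
  m2.items

-- ===== PRECONDITION & SPEC =====
def Spec_build_pstyle_map_py (abstract_nums : List (String × List (Int × List (String × String)))) (num_to_abstract : List (String × String)) (num_overrides : List (String × List (Int × List (String × String)))) (out : List (String × String × Int)) : Prop := out = build_pstyle_map_py_alt abstract_nums num_to_abstract num_overrides
instance (abstract_nums : List (String × List (Int × List (String × String)))) (num_to_abstract : List (String × String)) (num_overrides : List (String × List (Int × List (String × String)))) (out : List (String × String × Int)) : Decidable (Spec_build_pstyle_map_py abstract_nums num_to_abstract num_overrides out) := by unfold Spec_build_pstyle_map_py; infer_instance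

-- ===== CLAIM (what is proved, stated in full; the proofs are below) =====
def Claim_equal_build_pstyle_map_py : Prop := ∀ (abstract_nums : List (String × List (Int × List (String × String)))) (num_to_abstract : List (String × String)) (num_overrides : List (String × List (Int × List (String × String)))), Dom_build_pstyle_map_py abstract_nums num_to_abstract num_overrides → Spec_build_pstyle_map_py abstract_nums num_to_abstract num_overrides (build_pstyle_map_py abstract_nums num_to_abstract num_overrides)

-- ===== LEMMAS AND PROOFS =====

-- A's inner scan with `continue` is a fold over the filtered list
theorem pv_filter_fold {β : Type} (l : List (String × String)) (a : String) (g : β → String → β) (m : β) :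
    l.foldl (fun m q => if q.2 ≠ a then m else g m q.1) m
      = ((l.filter (fun q => q.2 == a)).map (·.1)).foldl g m := by
  induction l generalizing m with
  | nil => rfl
  | cons q t ih =>
    simp only [List.foldl_cons, List.filter_cons]
    by_cases h : q.2 = a
    · rw [if_neg (by simp [h]), if_pos (by simp [h])]
      simp only [List.map_cons, List.foldl_cons]
      exact ih (g m q.1)
    · rw [if_pos h, if_neg (by simp [h])]
      exact ih m

-- B's index lookup returns exactly the num_ids whose ref is `a`, in order
theorem pv_idx_getD (nta : List (String × String)) (a : String) :
    ((nta.map (fun q => (q.2, q.1))).foldl (fun d p => d.modify p.1 [] (· ++ [p.2]))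
        (PySem.Dict.empty : PySem.Dict String (List String))).getD a []
      = (nta.filter (fun q => q.2 == a)).map (·.1) := by
  rw [PySem.Dict.getD_foldl_modify_append]
  simp [List.filter_map, Function.comp_def]

-- ===== VERDICT (by name: the statement is the Claim_ definition above) =====
theorem build_pstyle_map_py_spec : Claim_equal_build_pstyle_map_py := by
  intro an nta no _
  show build_pstyle_map_py an nta no = build_pstyle_map_py_alt an nta no
  have hf : (fun (m : PySem.Dict String (String × Int)) (p : String × List (Int × List (String × String))) =>
        nta.foldl (fun m q => if q.2 ≠ p.1 then m else pvApplyLevels m q.1 p.2) m)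
      = (fun m p =>
        (((nta.map (fun q => (q.2, q.1))).foldl (fun d p => d.modify p.1 [] (· ++ [p.2]))
            (PySem.Dict.empty : PySem.Dict String (List String))).getD p.1 []).foldl
          (fun m num_id => pvApplyLevels m num_id p.2) m) := by
    funext m p
    rw [pv_idx_getD, ← pv_filter_fold]
  show (no.foldl (fun m p => pvApplyLevels m p.1 p.2)
      (an.foldl (fun m p => nta.foldl (fun m q => if q.2 ≠ p.1 then m else pvApplyLevels m q.1 p.2) m)
        PySem.Dict.empty)).items = _
  rw [hf]
  rfl
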